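-- pv_equiv track=rewrite | github.com/jonathandunn/c2xg | c2xg/functions_phrase_structure/get_pair_status.py | get_pair_status
-- ===== SOURCE A (Python) =====
-- def get_pair_status(pair,
-- 					pair_frequency_dictionary,
-- 					lr_association_dictionary,
-- 					rl_association_dictionary,
-- 					catenae_threshold
-- 					):
--
-- 	import cytoolz as ct
--
-- 	l_unit = pair[0]
-- 	r_unit = pair[1]
--
-- 	p1_l_pairs = [(x, y) for (x, y) in list(pair_frequency_dictionary.keys()) if x == l_unit]
-- 	p1_r_pairs = [(x, y) for (x, y) in list(pair_frequency_dictionary.keys()) if y == l_unit]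
--
--
-- 	p1_lr_freq = [pair_frequency_dictionary[x] for x in p1_l_pairs]
-- 	p1_rl_freq = [pair_frequency_dictionary[x] for x in p1_r_pairs]
--
-- 	p2_l_pairs = [(x, y) for (x, y) in list(pair_frequency_dictionary.keys()) if x == r_unit]
-- 	p2_r_pairs = [(x, y) for (x, y) in list(pair_frequency_dictionary.keys()) if y == r_unit]
--
-- 	p2_lr_freq = [pair_frequency_dictionary[x] for x in p2_l_pairs]
-- 	p2_rl_freq = [pair_frequency_dictionary[x] for x in p2_r_pairs]
--
-- 	#Calculate variables#
-- 	p1_l_freq = sum(p1_lr_freq)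
-- 	p1_r_freq = sum(p1_rl_freq)
-- 	p2_l_freq = sum(p2_lr_freq)
-- 	p2_r_freq = sum(p2_rl_freq)
--
-- 	classifier_output = (p1_l_freq - p1_r_freq) + (p2_r_freq - p2_l_freq)
--
-- 	if classifier_output > catenae_threshold:
-- 		status = "Catenae"
--
-- 	else:
-- 		status = "Non-Catenae"
--
-- 	return status
-- ===== SOURCE B (Python) =====
-- def get_pair_status(pair,
--                     pair_frequency_dictionary,
--                     lr_association_dictionary,
--                     rl_association_dictionary,
--                     catenae_threshold
--                     ):
--
--
--     l_unit = pair[0]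
--     r_unit = pair[1]
--
--     p1_l = 0
--     p1_r = 0
--     p2_l = 0
--     p2_r = 0
--
--     for (x, y), freq in pair_frequency_dictionary.items():
--         if x == l_unit:
--             p1_l += freq
--         if y == l_unit:
--             p1_r += freq
--         if x == r_unit:
--             p2_l += freq
--         if y == r_unit:
--             p2_r += freq
--
--     classifier_output = (p1_l - p1_r) + (p2_r - p2_l)
--
--     if classifier_output > catenae_threshold:
--         return "Catenae"
--     else:
--         return "Non-Catenae"
-- ===== Notes on version B (the rewrite author's own statement) =====
-- stated objective: simpler
-- what changed: Replaces A's eight passes (four key-filter comprehensions plus four lookup-map comprehensions, each re-indexing the dict) by a single pass over the dict items maintaining four integer accumulators.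
import Mathlib
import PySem

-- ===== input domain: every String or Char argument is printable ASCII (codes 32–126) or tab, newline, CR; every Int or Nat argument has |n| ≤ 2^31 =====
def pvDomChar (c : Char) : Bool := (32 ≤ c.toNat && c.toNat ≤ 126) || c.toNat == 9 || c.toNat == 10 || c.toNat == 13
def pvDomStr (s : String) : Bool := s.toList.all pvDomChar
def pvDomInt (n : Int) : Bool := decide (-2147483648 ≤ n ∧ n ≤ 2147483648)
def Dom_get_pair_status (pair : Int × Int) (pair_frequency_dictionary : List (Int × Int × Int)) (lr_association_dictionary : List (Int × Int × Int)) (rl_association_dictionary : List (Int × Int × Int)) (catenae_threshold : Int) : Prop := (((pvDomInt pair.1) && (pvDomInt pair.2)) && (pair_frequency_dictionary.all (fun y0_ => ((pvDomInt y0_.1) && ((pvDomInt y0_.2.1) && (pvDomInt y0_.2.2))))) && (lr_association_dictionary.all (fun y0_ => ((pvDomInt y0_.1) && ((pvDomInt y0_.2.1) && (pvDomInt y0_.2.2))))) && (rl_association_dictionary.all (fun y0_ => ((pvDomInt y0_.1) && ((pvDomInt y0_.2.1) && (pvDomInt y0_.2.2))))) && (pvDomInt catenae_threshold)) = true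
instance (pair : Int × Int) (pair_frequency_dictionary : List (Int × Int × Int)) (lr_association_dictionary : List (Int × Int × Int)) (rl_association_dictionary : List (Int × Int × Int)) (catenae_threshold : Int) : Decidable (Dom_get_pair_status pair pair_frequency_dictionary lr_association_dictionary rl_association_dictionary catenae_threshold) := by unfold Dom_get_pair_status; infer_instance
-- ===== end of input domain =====

-- B replaces A's eight comprehension passes (four key filters + four lookup maps) by a
-- single accumulating pass over the dict items; objective: simpler. Return value only.

-- ===== PORT A =====
-- dict subscript d[k]: first-match lookup in the association list (keys are unique under Pre_)
def pvLookup (d : List (Int × Int × Int)) (k : Int × Int) : Int :=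
  ((d.find? (fun e => (e.1, e.2.1) == k)).map (fun e => e.2.2)).getD 0

def get_pair_status (pair : Int × Int) (pair_frequency_dictionary : List (Int × Int × Int)) (lr_association_dictionary : List (Int × Int × Int)) (rl_association_dictionary : List (Int × Int × Int)) (catenae_threshold : Int) : String :=
  let l_unit := pair.1
  let r_unit := pair.2
  let keys := pair_frequency_dictionary.map (fun e => (e.1, e.2.1))
  let p1_l_pairs := keys.filter (fun k => k.1 == l_unit)
  let p1_r_pairs := keys.filter (fun k => k.2 == l_unit)
  let p1_lr_freq := p1_l_pairs.map (pvLookup pair_frequency_dictionary)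
  let p1_rl_freq := p1_r_pairs.map (pvLookup pair_frequency_dictionary)
  let p2_l_pairs := keys.filter (fun k => k.1 == r_unit)
  let p2_r_pairs := keys.filter (fun k => k.2 == r_unit)
  let p2_lr_freq := p2_l_pairs.map (pvLookup pair_frequency_dictionary)
  let p2_rl_freq := p2_r_pairs.map (pvLookup pair_frequency_dictionary)
  let p1_l_freq := p1_lr_freq.sum
  let p1_r_freq := p1_rl_freq.sum
  let p2_l_freq := p2_lr_freq.sum
  let p2_r_freq := p2_rl_freq.sum
  let classifier_output := (p1_l_freq - p1_r_freq) + (p2_r_freq - p2_l_freq)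
  if classifier_output > catenae_threshold then "Catenae" else "Non-Catenae"

-- ===== PORT B =====
def pvStep (l_unit r_unit : Int) (a : Int × Int × Int × Int) (e : Int × Int × Int) : Int × Int × Int × Int :=
  ((if e.1 == l_unit then a.1 + e.2.2 else a.1),
   (if e.2.1 == l_unit then a.2.1 + e.2.2 else a.2.1),
   (if e.1 == r_unit then a.2.2.1 + e.2.2 else a.2.2.1),
   (if e.2.1 == r_unit then a.2.2.2 + e.2.2 else a.2.2.2))

def get_pair_status_alt (pair : Int × Int) (pair_frequency_dictionary : List (Int × Int × Int)) (lr_association_dictionary : List (Int × Int × Int)) (rl_association_dictionary : List (Int × Int × Int)) (catenae_threshold : Int) : String :=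
  let l_unit := pair.1
  let r_unit := pair.2
  let acc := pair_frequency_dictionary.foldl (pvStep l_unit r_unit) (0, 0, 0, 0)
  let classifier_output := (acc.1 - acc.2.1) + (acc.2.2.2 - acc.2.2.1)
  if classifier_output > catenae_threshold then "Catenae" else "Non-Catenae"

-- ===== PRECONDITION & SPEC =====
-- Pre_ excludes association lists with duplicate (x, y) keys: a Python dict cannot contain
-- duplicate keys, so first-match lookup on such a list represents no Python input.
def Pre_get_pair_status (pair : Int × Int) (pair_frequency_dictionary : List (Int × Int × Int)) (lr_association_dictionary : List (Int × Int × Int)) (rl_association_dictionary : List (Int × Int × Int)) (catenae_threshold : Int) : Prop :=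
  (pair_frequency_dictionary.map (fun e => (e.1, e.2.1))).Nodup
instance (pair : Int × Int) (pair_frequency_dictionary : List (Int × Int × Int)) (lr_association_dictionary : List (Int × Int × Int)) (rl_association_dictionary : List (Int × Int × Int)) (catenae_threshold : Int) : Decidable (Pre_get_pair_status pair pair_frequency_dictionary lr_association_dictionary rl_association_dictionary catenae_threshold) := by unfold Pre_get_pair_status; infer_instance

def pvWitness_get_pair_status : (Int × Int) × (List (Int × Int × Int)) × (List (Int × Int × Int)) × (List (Int × Int × Int)) × Int :=
  ((1, 2), [(1, 2, 5), (2, 1, 3), (1, 3, 4)], [], [], 0)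

def Spec_get_pair_status (pair : Int × Int) (pair_frequency_dictionary : List (Int × Int × Int)) (lr_association_dictionary : List (Int × Int × Int)) (rl_association_dictionary : List (Int × Int × Int)) (catenae_threshold : Int) (out : String) : Prop := out = get_pair_status_alt pair pair_frequency_dictionary lr_association_dictionary rl_association_dictionary catenae_threshold
instance (pair : Int × Int) (pair_frequency_dictionary : List (Int × Int × Int)) (lr_association_dictionary : List (Int × Int × Int)) (rl_association_dictionary : List (Int × Int × Int)) (catenae_threshold : Int) (out : String) : Decidable (Spec_get_pair_status pair pair_frequency_dictionary lr_association_dictionary rl_association_dictionary catenae_threshold out) := by unfold Spec_get_pair_status; infer_instance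

-- ===== CLAIM (what is proved, stated in full; the proofs are below) =====
def Claim_equal_get_pair_status : Prop := ∀ (pair : Int × Int) (pair_frequency_dictionary : List (Int × Int × Int)) (lr_association_dictionary : List (Int × Int × Int)) (rl_association_dictionary : List (Int × Int × Int)) (catenae_threshold : Int), Dom_get_pair_status pair pair_frequency_dictionary lr_association_dictionary rl_association_dictionary catenae_threshold → Pre_get_pair_status pair pair_frequency_dictionary lr_association_dictionary rl_association_dictionary catenae_threshold → Spec_get_pair_status pair pair_frequency_dictionary lr_association_dictionary rl_association_dictionary catenae_threshold (get_pair_status pair pair_frequency_dictionary lr_association_dictionary rl_association_dictionary catenae_threshold)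

-- ===== LEMMAS AND PROOFS =====

-- under unique keys, looking up an element's own key returns that element's value
theorem pvLookup_self (d : List (Int × Int × Int))
    (hnd : (d.map (fun e => (e.1, e.2.1))).Nodup)
    (e : Int × Int × Int) (he : e ∈ d) :
    pvLookup d (e.1, e.2.1) = e.2.2 := by
  induction d with
  | nil => cases he
  | cons h t ih =>
    simp only [List.map_cons, List.nodup_cons] at hnd
    rcases List.mem_cons.mp he with rfl | het
    · simp [pvLookup, List.find?]
    · by_cases hk : (h.1, h.2.1) = (e.1, e.2.1)
      · exact absurd (hk ▸ List.mem_map.mpr ⟨e, het, rfl⟩) hnd.1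
      · have := ih hnd.2 het
        simp only [pvLookup, List.find?] at *
        have : ((h.1, h.2.1) == (e.1, e.2.1)) = false := by
          simpa using hk
        rw [this]
        exact ih hnd.2 het

-- A's "filter keys then look each key up" equals "filter entries, take their values"
theorem pvSumA (d : List (Int × Int × Int))
    (hnd : (d.map (fun e => (e.1, e.2.1))).Nodup)
    (p : Int × Int → Bool) :
    ((d.map (fun e => (e.1, e.2.1))).filter p).map (pvLookup d)
      = (d.filter (fun e => p (e.1, e.2.1))).map (fun e => e.2.2) := by
  rw [List.filter_map, List.map_map]
  apply List.map_congr_left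
  intro e he
  exact pvLookup_self d hnd e (List.mem_of_mem_filter he)

-- B's fold computes the four filtered sums
theorem pvFold (l r : Int) (d : List (Int × Int × Int)) (a : Int × Int × Int × Int) :
    d.foldl (pvStep l r) a =
      (a.1 + ((d.filter (fun e => e.1 == l)).map (fun e => e.2.2)).sum,
       a.2.1 + ((d.filter (fun e => e.2.1 == l)).map (fun e => e.2.2)).sum,
       a.2.2.1 + ((d.filter (fun e => e.1 == r)).map (fun e => e.2.2)).sum,
       a.2.2.2 + ((d.filter (fun e => e.2.1 == r)).map (fun e => e.2.2)).sum) := by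
  induction d generalizing a with
  | nil => simp
  | cons h t ih =>
    simp only [List.foldl_cons, ih, List.filter_cons, pvStep]
    split_ifs <;> simp [Prod.ext_iff] <;> omega

-- ===== VERDICT (by name: the statement is the Claim_ definition above) =====
theorem get_pair_status_spec : Claim_equal_get_pair_status := by
  intro pair d lr rl thr _ hpre
  unfold Spec_get_pair_status get_pair_status get_pair_status_alt
  simp only [pvFold, pvSumA d hpre]
  norm_num
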